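-- pv_equiv track=rewrite | github.com/Daculliber/Ncrypt5.0 | linux/file_explore.py | check
-- ===== SOURCE A (Python) =====
-- def check(inp,exp):
--     ind=0
--     sim=0
--     while len(exp)<len(inp):
--         exp+="/"
--     while len(exp)>len(inp):
--         inp+="/"
--     exp+="/"
--     for i in inp:
--         if i== exp[ind]:
--             sim+=1
--         ind+=1
--
--     return sim
-- ===== SOURCE B (Python) =====
-- def check(inp, exp):
--     sim = sum(a == b for a, b in zip(inp, exp))
--     m = min(len(inp), len(exp))
--     longer = inp if len(inp) >= len(exp) else exp
--     return sim + longer[m:].count('/')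
-- ===== Notes on version B (the rewrite author's own statement) =====
-- stated objective: simpler
-- what changed: B replaces A's two padding while-loops and indexed for-loop over mutated copies by a zip over the common prefix plus a count of '/' in the longer string's tail, building no padded strings.
import Mathlib
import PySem

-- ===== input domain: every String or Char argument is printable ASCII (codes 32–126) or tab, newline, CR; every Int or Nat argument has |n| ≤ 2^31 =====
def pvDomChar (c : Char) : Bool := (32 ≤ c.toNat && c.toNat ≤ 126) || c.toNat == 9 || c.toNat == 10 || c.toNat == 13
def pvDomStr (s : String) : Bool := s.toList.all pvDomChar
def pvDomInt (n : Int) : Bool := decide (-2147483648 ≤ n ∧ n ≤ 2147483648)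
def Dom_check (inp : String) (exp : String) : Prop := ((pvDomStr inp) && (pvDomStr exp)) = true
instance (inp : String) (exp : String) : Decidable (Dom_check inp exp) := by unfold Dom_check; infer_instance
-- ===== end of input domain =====

-- B counts matches on the common prefix via zip and adds the '/'-count of the longer
-- string's tail, instead of A's padding while-loops and indexed scan; return value only
-- (A rebinds its local parameters, which is unobservable to the caller).

-- ===== PORT A =====
-- while len(exp) < len(inp): exp += "/"   (and symmetrically)
def checkPad (target : Nat) (s : List Char) : List Char :=
  if s.length < target then checkPad target (s ++ ['/']) else s
  termination_by target - s.length
  decreasing_by simp; omega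

-- for i in inp: if i == exp[ind]: sim += 1; ind += 1
def checkLoop (e : List Char) : List Char → Int → Int → Int
  | [], _, sim => sim
  | c :: rest, ind, sim =>
      checkLoop e rest (ind + 1)
        (if PySem.List.pyGet? e ind == some c then sim + 1 else sim)

def check (inp : String) (exp : String) : Int :=
  let a := inp.toList
  let b := exp.toList
  let b2 := checkPad a.length b
  let a2 := checkPad b2.length a
  let e := b2 ++ ['/']
  checkLoop e a2 0 0

-- ===== PORT B =====
def check_alt (inp : String) (exp : String) : Int :=
  let a := inp.toList
  let b := exp.toList
  let sim : Int := ((a.zip b).countP fun p => p.1 == p.2 : Nat)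
  let m := min a.length b.length
  let longer := if a.length ≥ b.length then a else b
  sim + ((longer.drop m).count '/' : Nat)

-- ===== PRECONDITION & SPEC =====
def Spec_check (inp : String) (exp : String) (out : Int) : Prop := out = check_alt inp exp
instance (inp : String) (exp : String) (out : Int) : Decidable (Spec_check inp exp out) := by unfold Spec_check; infer_instance

-- ===== CLAIM (what is proved, stated in full; the proofs are below) =====
def Claim_equal_check : Prop := ∀ (inp : String) (exp : String), Dom_check inp exp → Spec_check inp exp (check inp exp)

-- ===== LEMMAS AND PROOFS =====

theorem checkPad_eq (target : Nat) (s : List Char) :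
    checkPad target s = s ++ List.replicate (target - s.length) '/' := by
  induction s using checkPad.induct target with
  | case1 s h ih =>
      rw [checkPad, if_pos h, ih]
      have hrep : target - s.length = (target - (s ++ ['/']).length) + 1 := by simp; omega
      rw [hrep, List.replicate_succ]
      simp
  | case2 s h =>
      rw [checkPad, if_neg h]
      have hrep : target - s.length = 0 := by omega
      simp [hrep]

theorem checkLoop_eq (e : List Char) (a : List Char) (ind : Nat) (sim : Int)
    (h : ind + a.length ≤ e.length) :
    checkLoop e a (ind : Int) sim
      = sim + ((a.zip (e.drop ind)).countP fun p => p.1 == p.2 : Nat) := by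
  induction a generalizing ind sim with
  | nil => simp [checkLoop]
  | cons c rest ih =>
      have hlt : ind < e.length := by simp at h; omega
      have hd : e.drop ind = e[ind] :: e.drop (ind + 1) :=
        (List.drop_eq_getElem_cons hlt)
      rw [checkLoop]
      have hget : PySem.List.pyGet? e (ind : Int) = some e[ind] :=
        PySem.List.pyGet?_ofNat e ind hlt
      have hcast : (ind : Int) + 1 = ((ind + 1 : Nat) : Int) := by push_cast; ring
      rw [hget, hcast, ih _ _ (by simp only [List.length_cons] at h; omega), hd, List.zip_cons_cons,
        List.countP_cons]
      by_cases hc : c = e[ind]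
      · simp [hc]
        ring
      · simp [hc, show ¬ e[ind] = c from fun h' => hc h'.symm]

-- zip ignores the appended part when the left list is at most as long as y
theorem zip_append_of_le {α β : Type} (x : List α) (y z : List β)
    (h : x.length ≤ y.length) : x.zip (y ++ z) = x.zip y := by
  induction x generalizing y with
  | nil => simp
  | cons a x ih =>
      cases y with
      | nil => simp at h
      | cons b y => simp at h; simp [List.zip_cons_cons, ih y (by omega)]

theorem zip_append_of_le' {α β : Type} (x z : List α) (y : List β)
    (h : y.length ≤ x.length) : (x ++ z).zip y = x.zip y := by
  induction x generalizing y with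
  | nil => simp at h; simp [h]
  | cons a x ih =>
      cases y with
      | nil => simp
      | cons b y => simp at h; simp [List.zip_cons_cons, ih y (by omega)]

theorem countP_zip_replicate (a : List Char) (k : Nat) (h : a.length ≤ k) :
    ((a.zip (List.replicate k '/')).countP fun p => p.1 == p.2) = a.count '/' := by
  induction a generalizing k with
  | nil => simp
  | cons c rest ih =>
      cases k with
      | zero => simp at h
      | succ k =>
          simp only [List.replicate_succ, List.zip_cons_cons, List.countP_cons]
          rw [ih k (by simp at h; omega)]
          by_cases hc : c = '/' <;> simp [hc, Ne.symm]

theorem countP_replicate_zip (b : List Char) (k : Nat) (h : b.length ≤ k) :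
    (((List.replicate k '/').zip b).countP fun p => p.1 == p.2) = b.count '/' := by
  induction b generalizing k with
  | nil => simp
  | cons c rest ih =>
      cases k with
      | zero => simp at h
      | succ k =>
          simp only [List.replicate_succ, List.zip_cons_cons, List.countP_cons]
          rw [ih k (by simp at h; omega)]
          by_cases hc : c = '/' <;> simp [hc, Ne.symm]

-- main padded-count lemma, exp shorter (or equal)
theorem count_pad_right (a b : List Char) (k : Nat) (h : a.length = b.length + k) :
    ((a.zip (b ++ List.replicate k '/')).countP fun p => p.1 == p.2)
      = ((a.zip b).countP fun p => p.1 == p.2) + (a.drop b.length).count '/' := by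
  have hsplit : a = a.take b.length ++ a.drop b.length := (List.take_append_drop _ _).symm
  have hlen : (a.take b.length).length = b.length := by simp; omega
  conv_lhs => rw [hsplit]
  rw [List.zip_append (by simpa using hlen), List.countP_append]
  congr 1
  · conv_rhs => rw [hsplit]
    rw [zip_append_of_le' _ _ _ (by omega)]
  · exact countP_zip_replicate _ _ (by simp; omega)

-- main padded-count lemma, inp shorter
theorem count_pad_left (a b : List Char) (k : Nat) (h : b.length = a.length + k) :
    (((a ++ List.replicate k '/').zip b).countP fun p => p.1 == p.2)
      = ((a.zip b).countP fun p => p.1 == p.2) + (b.drop a.length).count '/' := by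
  have hsplit : b = b.take a.length ++ b.drop a.length := (List.take_append_drop _ _).symm
  have hlen : (b.take a.length).length = a.length := by simp; omega
  conv_lhs => rw [hsplit]
  rw [List.zip_append (by simpa using hlen.symm), List.countP_append]
  congr 1
  · conv_rhs => rw [hsplit]
    rw [zip_append_of_le _ _ _ (by omega)]
  · exact countP_replicate_zip _ _ (by simp; omega)

-- ===== VERDICT (by name: the statement is the Claim_ definition above) =====
theorem check_spec : Claim_equal_check := by
  intro inp exp _
  unfold Spec_check check check_alt
  simp only []
  set a := inp.toList with ha
  set b := exp.toList with hb
  rw [checkPad_eq a.length b]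
  by_cases hle : b.length ≤ a.length
  · -- exp was padded (or equal); inp unchanged
    have hlen2 : (b ++ List.replicate (a.length - b.length) '/').length = a.length := by
      simp; omega
    rw [hlen2, checkPad_eq a.length a, Nat.sub_self, List.replicate_zero, List.append_nil]
    have h0 : (0 : Int) = ((0 : Nat) : Int) := rfl
    rw [h0, checkLoop_eq _ _ _ _ (by simp; omega)]
    simp only [List.drop_zero]
    rw [zip_append_of_le _ _ _ (by simp; omega)]
    rw [count_pad_right a b (a.length - b.length) (by omega)]
    have hmin : min a.length b.length = b.length := by omega
    simp [hle, zero_add]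
  · -- inp was padded
    rw [not_le] at hle
    have : a.length - b.length = 0 := by omega
    rw [this, List.replicate_zero, List.append_nil, checkPad_eq b.length a]
    have h0 : (0 : Int) = ((0 : Nat) : Int) := rfl
    rw [h0, checkLoop_eq _ _ _ _ (by simp; omega)]
    simp only [List.drop_zero]
    rw [zip_append_of_le _ _ _ (by simp; omega)]
    rw [count_pad_left a b (b.length - a.length) (by omega)]
    have hmin : min a.length b.length = a.length := by omega
    have hge : ¬ a.length ≥ b.length := by omega
    simp [hmin, hge, zero_add]
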